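-- pv_equiv track=rewrite | github.com/yattom/adventofcode | 2024_24/puzzle.py | format_bits
-- ===== SOURCE A (Python) =====
-- def format_bits(bits):
--     result = ''
--     for i in range(0, len(bits)):
--         result += bits[i]
--         if i % 16 == 15:
--             result += ':'
--         elif i % 4 == 3:
--             result += ' '
--     return result.strip()
-- ===== SOURCE B (Python) =====
-- def format_bits(bits):
--     parts = []
--     for ci in range(0, len(bits), 4):
--         chunk = bits[ci:ci + 4]
--         parts.append(''.join(chunk))
--         if len(chunk) == 4:
--             parts.append(':' if ci % 16 == 12 else ' ')
--     return ''.join(parts).strip()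
-- ===== Notes on version B (the rewrite author's own statement) =====
-- stated objective: alternative
-- what changed: Replaces the per-element loop with per-index separator tests by a pass over 4-element chunks that joins each chunk at once and appends one separator per full chunk, keeping the append-then-strip shape.
import Mathlib
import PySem

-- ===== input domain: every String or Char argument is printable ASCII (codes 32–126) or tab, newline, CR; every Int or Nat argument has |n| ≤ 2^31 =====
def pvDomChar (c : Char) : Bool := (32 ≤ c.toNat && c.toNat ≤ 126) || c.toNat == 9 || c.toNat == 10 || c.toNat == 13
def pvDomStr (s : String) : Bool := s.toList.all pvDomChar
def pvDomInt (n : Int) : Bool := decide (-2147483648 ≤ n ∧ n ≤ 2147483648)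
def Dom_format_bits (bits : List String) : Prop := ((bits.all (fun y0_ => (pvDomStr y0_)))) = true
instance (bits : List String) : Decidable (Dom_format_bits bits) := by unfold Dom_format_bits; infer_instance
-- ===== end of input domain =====

-- B groups the input into 4-element chunks joined at once, with one separator decision
-- per full chunk, instead of A's per-element loop testing every index (objective: alternative decomposition).

-- ===== PORT A =====
def format_bits (bits : List String) : String :=
  PySem.Str.strip <|
    (PySem.List.pyRange 0 (bits.length : Int) 1).foldl
      (fun result i =>
        -- i ranges over 0..len(bits)-1, so bits[i] never raises; getD "" is unreachable
        let result := result ++ ((PySem.List.pyGet? bits i).getD "")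
        if PySem.Int.mod i 16 == 15 then result ++ ":"
        else if PySem.Int.mod i 4 == 3 then result ++ " "
        else result)
      ""

-- ===== PORT B =====
def format_bits_alt (bits : List String) : String :=
  PySem.Str.strip <| PySem.Str.join "" <|
    (PySem.List.pyRange 0 (bits.length : Int) 4).foldl
      (fun parts ci =>
        let chunk := PySem.List.slice bits (some ci) (some (ci + 4))
        let parts := parts ++ [PySem.Str.join "" chunk]
        if chunk.length == 4 then
          parts ++ [if PySem.Int.mod ci 16 == 12 then ":" else " "]
        else parts)
      []

-- ===== PRECONDITION & SPEC =====
def Spec_format_bits (bits : List String) (out : String) : Prop := out = format_bits_alt bits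
instance (bits : List String) (out : String) : Decidable (Spec_format_bits bits out) := by unfold Spec_format_bits; infer_instance

-- ===== CLAIM (what is proved, stated in full; the proofs are below) =====
def Claim_equal_format_bits : Prop := ∀ (bits : List String), Dom_format_bits bits → Spec_format_bits bits (format_bits bits)

-- ===== LEMMAS AND PROOFS =====

-- characterisation of A's loop output (pre-strip), as chars
def fA (k : Nat) : List String → List Char
  | [] => []
  | x :: r =>
      x.toList ++ (if k % 16 = 15 then [':'] else if k % 4 = 3 then [' '] else []) ++ fA (k + 1) r

-- characterisation of B's loop output (pre-strip), as chars
def fB (k : Nat) : List String → List Char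
  | [] => []
  | [a] => a.toList
  | [a, b] => a.toList ++ b.toList
  | [a, b, c] => a.toList ++ b.toList ++ c.toList
  | a :: b :: c :: d :: r =>
      a.toList ++ b.toList ++ c.toList ++ d.toList ++
        (if k % 16 = 12 then [':'] else [' ']) ++ fB (k + 4) r

theorem join_nil_flatten (xs : List (List Char)) : PySem.Chars.join [] xs = xs.flatten := by
  match xs with
  | [] => simp [PySem.Chars.join_nil]
  | [p] => simp [PySem.Chars.join_singleton]
  | p :: q :: rest =>
      rw [PySem.Chars.join_cons_cons]
      simp [join_nil_flatten (q :: rest)]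

theorem pyRange_four_nil {a b : Int} (h : b ≤ a) : PySem.List.pyRange a b 4 = [] := by
  rw [PySem.List.pyRange_of_pos a b (by norm_num)]
  simp [show ¬ a < b by omega]

theorem pyRange_four_cons {a b : Int} (h : a < b) :
    PySem.List.pyRange a b 4 = a :: PySem.List.pyRange (a + 4) b 4 := by
  rw [PySem.List.pyRange_of_pos a b (by norm_num),
      PySem.List.pyRange_of_pos (a + 4) b (by norm_num)]
  have hc : ((b - a + 4 - 1) / 4).toNat
      = (if a + 4 < b then ((b - (a + 4) + 4 - 1) / 4).toNat else 0) + 1 := by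
    split_ifs with h4 <;> omega
  rw [if_pos h, hc, List.range_succ_eq_map]
  simp [List.map_map, Function.comp]
  intro k _
  omega

theorem mod16_cast (j : Nat) : PySem.Int.mod (j : Int) 16 = ((j % 16 : Nat) : Int) := by
  rw [PySem.Int.mod_eq_emod_of_pos (by norm_num)]; push_cast; ring

theorem mod4_cast (j : Nat) : PySem.Int.mod (j : Int) 4 = ((j % 4 : Nat) : Int) := by
  rw [PySem.Int.mod_eq_emod_of_pos (by norm_num)]; push_cast; ring

theorem loopA : ∀ (tail : List String) (j : Nat) (bits : List String) (s : String),
    bits.drop j = tail →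
    ((PySem.List.pyRange (j : Int) (bits.length : Int) 1).foldl
      (fun result i =>
        let result := result ++ ((PySem.List.pyGet? bits i).getD "")
        if PySem.Int.mod i 16 == 15 then result ++ ":"
        else if PySem.Int.mod i 4 == 3 then result ++ " "
        else result)
      s).toList = s.toList ++ fA j tail
  | [], j, bits, s, hd => by
      have hj : bits.length ≤ j := by
        by_contra hlt
        have := List.drop_eq_nil_iff.mp hd
        omega
      rw [PySem.List.pyRange_one_eq_nil (by exact_mod_cast hj)]
      simp [fA]
  | x :: r, j, bits, s, hd => by
      have hj : j < bits.length := by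
        by_contra hge
        rw [List.drop_eq_nil_of_le (by omega)] at hd
        exact List.cons_ne_nil x r hd.symm
      have hget : bits[j]? = some x := by
        have : (bits.drop j)[0]? = some x := by rw [hd]; rfl
        simpa using this
      have hd' : bits.drop (j + 1) = r := by
        have : (bits.drop j).drop 1 = bits.drop (j + 1) := by
          rw [List.drop_drop]
        rw [← this, hd]; rfl
      rw [PySem.List.pyRange_one_cons (by exact_mod_cast hj)]
      rw [List.foldl_cons]
      have hcast : ((j : Int) + 1) = ((j + 1 : Nat) : Int) := by push_cast; ring
      simp only [PySem.List.pyGet?_natCast, hget, Option.getD_some,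
        mod16_cast, mod4_cast]
      rw [hcast] -- align the index cast before recursing
      by_cases h16 : j % 16 = 15
      · have h4 : j % 4 = 3 := by omega
        rw [loopA r (j + 1) bits _ hd']
        simp [h16, fA]
      · by_cases h4 : j % 4 = 3
        · rw [loopA r (j + 1) bits _ hd']
          simp [fA, h16, h4, show ¬((j:Int) % 16 = 15) by omega]
        · rw [loopA r (j + 1) bits _ hd']
          simp [fA, h16, h4, show ¬((j:Int) % 16 = 15) by omega,
            show ¬((j:Int) % 4 = 3) by omega]

theorem loopB : ∀ (tail : List String) (j : Nat) (bits : List String) (parts : List String),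
    bits.drop j = tail →
    (List.map String.toList
      ((PySem.List.pyRange (j : Int) (bits.length : Int) 4).foldl
        (fun parts ci =>
          let chunk := PySem.List.slice bits (some ci) (some (ci + 4))
          let parts := parts ++ [PySem.Str.join "" chunk]
          if chunk.length == 4 then
            parts ++ [if PySem.Int.mod ci 16 == 12 then ":" else " "]
          else parts)
        parts)).flatten
      = (List.map String.toList parts).flatten ++ fB j tail
  | [], j, bits, parts, hd => by
      have hj : bits.length ≤ j := by
        by_contra hlt
        have := List.drop_eq_nil_iff.mp hd
        omega
      rw [pyRange_four_nil (by exact_mod_cast hj)]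
      simp [fB]
  | x :: r, j, bits, parts, hd => by
      have hj : j < bits.length := by
        by_contra hge
        rw [List.drop_eq_nil_of_le (by omega)] at hd
        exact List.cons_ne_nil x r hd.symm
      have hslice : PySem.List.slice bits (some (j : Int)) (some ((j : Int) + 4))
          = (x :: r).take 4 := by
        have h4 : ((j : Int) + 4) = ((j + 4 : Nat) : Int) := by push_cast; ring
        rw [h4, PySem.List.slice_natCast, ← hd]
        congr 1; omega
      have hcast : ((j : Int) + 4) = ((j + 4 : Nat) : Int) := by push_cast; ring
      have hlen : bits.length = j + (x :: r).length := by
        have := List.length_drop (l := bits) (i := j)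
        rw [hd] at this; omega
      rw [pyRange_four_cons (by exact_mod_cast hj), List.foldl_cons]
      simp only [hcast]
      match r with
      | [] =>
          rw [pyRange_four_nil (by simp at hlen; exact_mod_cast (by omega : bits.length ≤ (j + 4 : Nat)))]
          simp [hslice, fB, PySem.Str.toList_join]
      | [b] =>
          rw [pyRange_four_nil (by simp at hlen; exact_mod_cast (by omega : bits.length ≤ (j + 4 : Nat)))]
          simp [hslice, fB, PySem.Str.toList_join, join_nil_flatten]
      | [b, c] =>
          rw [pyRange_four_nil (by simp at hlen; exact_mod_cast (by omega : bits.length ≤ (j + 4 : Nat)))]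
          simp [hslice, fB, PySem.Str.toList_join, join_nil_flatten]
      | b :: c :: d :: r' =>
          have hd' : bits.drop (j + 4) = r' := by
            have h2 : (bits.drop j).drop 4 = r' := by rw [hd]; rfl
            rw [← h2]
            simp [List.drop_drop]
          rw [loopB r' (j + 4) bits _ hd']
          simp only [mod16_cast]
          by_cases h16 : j % 16 = 12
          · simp [hslice, fB, h16, PySem.Str.toList_join, join_nil_flatten]
          · simp [hslice, fB, h16, show ¬((j:Int) % 16 = 12) by omega,
              PySem.Str.toList_join, join_nil_flatten]

theorem fA_eq_fB : ∀ (l : List String) (k : Nat), k % 4 = 0 → fA k l = fB k l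
  | [], k, _ => rfl
  | [a], k, h => by
      simp [fA, fB, show ¬ k % 16 = 15 by omega, show ¬ k % 4 = 3 by omega]
  | [a, b], k, h => by
      simp [fA, fB,
        show ¬ k % 16 = 15 by omega, show ¬ k % 4 = 3 by omega,
        show ¬ (k + 1) % 16 = 15 by omega, show ¬ (k + 1) % 4 = 3 by omega]
  | [a, b, c], k, h => by
      simp [fA, fB,
        show ¬ k % 16 = 15 by omega, show ¬ k % 4 = 3 by omega,
        show ¬ (k + 1) % 16 = 15 by omega, show ¬ (k + 1) % 4 = 3 by omega,
        show ¬ (k + 2) % 16 = 15 by omega, show ¬ (k + 2) % 4 = 3 by omega]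
  | a :: b :: c :: d :: r, k, h => by
      have hrec := fA_eq_fB r (k + 4) (by omega)
      by_cases h16 : k % 16 = 12
      · simp [fA, fB, hrec,
          show ¬ k % 4 = 3 by omega,
          show ¬ (k + 1) % 16 = 15 by omega, show ¬ (k + 1) % 4 = 3 by omega,
          show ¬ (k + 2) % 16 = 15 by omega, show ¬ (k + 2) % 4 = 3 by omega,
          show (k + 3) % 16 = 15 by omega, h16, show k + 1 + 1 + 1 + 1 = k + 4 by omega]
      · simp [fA, fB, hrec,
          show ¬ k % 16 = 15 by omega, show ¬ k % 4 = 3 by omega,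
          show ¬ (k + 1) % 16 = 15 by omega, show ¬ (k + 1) % 4 = 3 by omega,
          show ¬ (k + 2) % 16 = 15 by omega, show ¬ (k + 2) % 4 = 3 by omega,
          show ¬ (k + 3) % 16 = 15 by omega, show (k + 3) % 4 = 3 by omega,
          h16, show k + 1 + 1 + 1 + 1 = k + 4 by omega]

-- ===== VERDICT (by name: the statement is the Claim_ definition above) =====
theorem format_bits_spec : Claim_equal_format_bits := by
  intro bits _
  unfold Spec_format_bits format_bits format_bits_alt
  have hA := loopA bits 0 bits "" (by simp)
  have hB := loopB bits 0 bits [] (by simp)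
  apply congrArg PySem.Str.strip
  apply String.toList_inj.mp
  rw [PySem.Str.toList_join, show ("" : String).toList = ([] : List Char) from rfl,
      join_nil_flatten]
  simp only [Nat.cast_zero] at hA hB
  rw [hA, hB]
  simp [fA_eq_fB bits 0 rfl]
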